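-- pv_equiv track=rewrite | github.com/Aryudesu/ABC | ABC/148/ABC148E.py | calc
-- ===== SOURCE A (Python) =====
-- def calc(N):
--     if N % 2:
--         return 0
--     result = N//10
--     N //= 10
--     while N:
--         result += N // 5
--         N //= 5
--     return result
-- ===== SOURCE B (Python) =====
-- def calc(N):
--     if N % 2:
--         return 0
--     M = N // 2
--     s = 0
--     t = M
--     while t:
--         s += t % 5
--         t //= 5
--     return (M - s) // 4
-- ===== Notes on version B (the rewrite author's own statement) =====
-- stated objective: alternative
-- what changed: Replaces the Legendre quotient-summing loop (result += N//5 repeatedly) by the closed form v5(M!) = (M - digitsum_base5(M))/4, where the loop accumulates base-5 digits of M = N//2 instead of quotients.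
import Mathlib
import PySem

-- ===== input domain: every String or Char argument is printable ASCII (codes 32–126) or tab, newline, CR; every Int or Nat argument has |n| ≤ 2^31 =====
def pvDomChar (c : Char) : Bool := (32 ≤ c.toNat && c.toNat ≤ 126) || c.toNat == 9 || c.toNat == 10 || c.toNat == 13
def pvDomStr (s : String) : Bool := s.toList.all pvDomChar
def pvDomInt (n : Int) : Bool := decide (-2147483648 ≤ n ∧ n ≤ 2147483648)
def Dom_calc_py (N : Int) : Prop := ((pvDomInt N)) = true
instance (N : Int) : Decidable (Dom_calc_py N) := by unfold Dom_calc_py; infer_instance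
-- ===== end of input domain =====

-- B replaces A's quotient-summing loop by the digit-sum closed form (M - digitsum5 M)/4; alternative, same cost.
-- Both Pythons loop forever on negative even N (N//5 sticks at -1), so Pre_ excludes those inputs.

-- ===== PORT A =====
-- while N: result += N // 5; N //= 5  — fuel only makes the recursion total; 64 iterations
-- never run out on any |N| ≤ 2^31 admitted by Dom (proved in the lemmas below).
def pvALoop : Nat → Int → Int → Int
  | 0, _, acc => acc
  | fuel + 1, n, acc =>
      if n ≠ 0 then pvALoop fuel (PySem.Int.floordiv n 5) (acc + PySem.Int.floordiv n 5)
      else acc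

def calc_py (N : Int) : Int :=
  if PySem.Int.mod N 2 ≠ 0 then 0
  else pvALoop 64 (PySem.Int.floordiv N 10) (PySem.Int.floordiv N 10)

-- ===== PORT B =====
-- while t: s += t % 5; t //= 5  — same fuel remark as above.
def pvBLoop : Nat → Int → Int → Int
  | 0, _, s => s
  | fuel + 1, t, s =>
      if t ≠ 0 then pvBLoop fuel (PySem.Int.floordiv t 5) (s + PySem.Int.mod t 5)
      else s

-- return (M - s) // 4, with M bound once as in Source B
def pvBRet (M : Int) : Int := PySem.Int.floordiv (M - pvBLoop 64 M 0) 4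

def calc_py_alt (N : Int) : Int :=
  if PySem.Int.mod N 2 ≠ 0 then 0
  else pvBRet (PySem.Int.floordiv N 2)

-- ===== PRECONDITION & SPEC =====
-- Pre_ excludes negative even N: there the Python A (and B) never return (the while loop never ends).
def Pre_calc_py (N : Int) : Prop := PySem.Int.mod N 2 ≠ 0 ∨ 0 ≤ N
instance (N : Int) : Decidable (Pre_calc_py N) := by unfold Pre_calc_py; infer_instance
def pvWitness_calc_py : Int := 20

def Spec_calc_py (N : Int) (out : Int) : Prop := out = calc_py_alt N
instance (N : Int) (out : Int) : Decidable (Spec_calc_py N out) := by unfold Spec_calc_py; infer_instance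

-- ===== CLAIM (what is proved, stated in full; the proofs are below) =====
def Claim_equal_calc_py : Prop := ∀ (N : Int), Dom_calc_py N → Pre_calc_py N → Spec_calc_py N (calc_py N)

-- ===== LEMMAS AND PROOFS =====

-- Legendre sum L m = m/5 + L (m/5) and base-5 digit sum S m, on Nat.
def pvL : Nat → Nat
  | 0 => 0
  | m + 1 => (m + 1) / 5 + pvL ((m + 1) / 5)
decreasing_by exact Nat.div_lt_self (Nat.succ_pos m) (by omega)

def pvS : Nat → Nat
  | 0 => 0
  | m + 1 => (m + 1) % 5 + pvS ((m + 1) / 5)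
decreasing_by exact Nat.div_lt_self (Nat.succ_pos m) (by omega)

lemma pvL_eq (m : Nat) (hm : m ≠ 0) : pvL m = m / 5 + pvL (m / 5) := by
  cases m with
  | zero => simp at hm
  | succ k => simp [pvL]

lemma pvS_eq (m : Nat) (hm : m ≠ 0) : pvS m = m % 5 + pvS (m / 5) := by
  cases m with
  | zero => simp at hm
  | succ k => simp [pvS]

lemma pv_identity (m : Nat) : 4 * pvL m + pvS m = m := by
  induction m using Nat.strong_induction_on with
  | _ m ih =>
    rcases Nat.eq_zero_or_pos m with h | h
    · subst h; simp [pvL, pvS]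
    · have hne : m ≠ 0 := Nat.pos_iff_ne_zero.mp h
      rw [pvL_eq m hne, pvS_eq m hne]
      have := ih (m / 5) (Nat.div_lt_self h (by omega))
      omega

lemma pv_fdiv5 (m : Nat) : PySem.Int.floordiv (m : Int) 5 = ((m / 5 : Nat) : Int) := by
  exact_mod_cast PySem.Int.floordiv_natCast m 5

lemma pv_mod5 (m : Nat) : PySem.Int.mod (m : Int) 5 = ((m % 5 : Nat) : Int) := by
  exact_mod_cast PySem.Int.mod_natCast m 5

lemma pv_div_lt (m f : Nat) (h : m < 5 ^ (f + 1)) : m / 5 < 5 ^ f := by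
  have h5 : 5 ^ (f + 1) = 5 ^ f * 5 := by ring
  exact (Nat.div_lt_iff_lt_mul (by omega)).mpr (by omega)

lemma pvALoop_eq (fuel : Nat) (m : Nat) (acc : Int) (h : m < 5 ^ fuel) :
    pvALoop fuel (m : Int) acc = acc + (pvL m : Int) := by
  induction fuel generalizing m acc with
  | zero =>
    have : m = 0 := by simpa using h
    subst this; simp [pvALoop, pvL]
  | succ f ih =>
    by_cases hm : m = 0
    · subst hm; simp [pvALoop, pvL]
    · have hne : (m : Int) ≠ 0 := by exact_mod_cast hm
      have hstep : pvALoop (f + 1) (m : Int) acc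
          = pvALoop f (PySem.Int.floordiv (m : Int) 5) (acc + PySem.Int.floordiv (m : Int) 5) := by
        rw [show pvALoop (f + 1) (m : Int) acc
            = if (m : Int) ≠ 0 then pvALoop f (PySem.Int.floordiv (m : Int) 5)
                (acc + PySem.Int.floordiv (m : Int) 5) else acc from rfl, if_pos hne]
      rw [hstep, pv_fdiv5 m, ih (m / 5) _ (pv_div_lt m f h), pvL_eq m hm]
      push_cast; ring

lemma pvBLoop_eq (fuel : Nat) (m : Nat) (s : Int) (h : m < 5 ^ fuel) :
    pvBLoop fuel (m : Int) s = s + (pvS m : Int) := by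
  induction fuel generalizing m s with
  | zero =>
    have : m = 0 := by simpa using h
    subst this; simp [pvBLoop, pvS]
  | succ f ih =>
    by_cases hm : m = 0
    · subst hm; simp [pvBLoop, pvS]
    · have hne : (m : Int) ≠ 0 := by exact_mod_cast hm
      have hstep : pvBLoop (f + 1) (m : Int) s
          = pvBLoop f (PySem.Int.floordiv (m : Int) 5) (s + PySem.Int.mod (m : Int) 5) := by
        rw [show pvBLoop (f + 1) (m : Int) s
            = if (m : Int) ≠ 0 then pvBLoop f (PySem.Int.floordiv (m : Int) 5)
                (s + PySem.Int.mod (m : Int) 5) else s from rfl, if_pos hne]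
      rw [hstep, pv_fdiv5 m, pv_mod5 m, ih (m / 5) _ (pv_div_lt m f h), pvS_eq m hm]
      push_cast; ring

-- ===== VERDICT (by name: the statement is the Claim_ definition above) =====
theorem calc_py_spec : Claim_equal_calc_py := by
  intro N hdom hpre
  unfold Spec_calc_py calc_py calc_py_alt
  by_cases hodd : PySem.Int.mod N 2 ≠ 0
  · rw [if_pos hodd, if_pos hodd]
  · rw [if_neg hodd, if_neg hodd]
    have hN0 : 0 ≤ N := by
      rcases hpre with h | h
      · exact absurd h hodd
      · exact h
    obtain ⟨k, rfl⟩ : ∃ k : Nat, N = (k : Int) := ⟨N.toNat, (Int.toNat_of_nonneg hN0).symm⟩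
    have hk : k ≤ 2147483648 := by
      unfold Dom_calc_py pvDomInt at hdom
      rw [decide_eq_true_iff] at hdom
      omega
    have hbound : ∀ j : Nat, j ≤ k → j < 5 ^ 64 := by
      intro j hj
      calc j ≤ 2147483648 := le_trans hj hk
        _ < 5 ^ 64 := by norm_num
    have h10 : PySem.Int.floordiv (k : Int) 10 = ((k / 10 : Nat) : Int) := by
      exact_mod_cast PySem.Int.floordiv_natCast k 10
    have h2 : PySem.Int.floordiv (k : Int) 2 = ((k / 2 : Nat) : Int) := by
      exact_mod_cast PySem.Int.floordiv_natCast k 2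
    unfold pvBRet
    rw [h10, h2, pvALoop_eq 64 (k / 10) _ (hbound _ (Nat.div_le_self _ _)),
        pvBLoop_eq 64 (k / 2) 0 (hbound _ (Nat.div_le_self _ _))]
    have hLdef : (pvL (k / 2) : Int) = ((k / 10 : Nat) : Int) + ((pvL (k / 10) : Nat) : Int) := by
      by_cases hz : k / 2 = 0
      · have h100 : k / 10 = 0 := by omega
        rw [hz, h100]; simp [pvL]
      · rw [pvL_eq (k / 2) hz]
        have hq : k / 2 / 5 = k / 10 := by omega
        rw [hq]; push_cast; ring
    have hid := pv_identity (k / 2)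
    have hMB : ((k / 2 : Nat) : Int) - (0 + (pvS (k / 2) : Int)) = 4 * (pvL (k / 2) : Int) := by
      push_cast; omega
    rw [hMB]
    have hdiv4 : PySem.Int.floordiv (4 * (pvL (k / 2) : Int)) 4 = (pvL (k / 2) : Int) := by
      rw [PySem.Int.floordiv_eq_iff_of_pos (by omega)]
      constructor <;> nlinarith [Int.natCast_nonneg (pvL (k / 2))]
    rw [hdiv4, hLdef]
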